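-- pv_equiv track=rewrite | github.com/Computamos/Guias-TDA | guia1/codigo.py | cazadorDeFalsosContador
-- ===== SOURCE A (Python) =====
-- def conjuncionSubmatriz(
--         i_0: int, i_1: int, j_0: int, j_1: int, matriz: list[list[bool]]
-- ) -> bool:
--
--     for i in range(i_0, i_1):
--         for j in range(j_0, j_1):
--             if not matriz[i][j]: # if matriz[i][j] == False
--                 return False
--
--     return True
--
-- def cazadorDeFalsosContador(
--     i_0: int, i_1: int, j_0: int, j_1: int, matriz: list[list[bool]]
-- ) -> tuple[int, int]:
--
--     # Conquer
--     if i_1 - i_0 == 1 and j_1 - j_0 == 1: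
--         res:int = 0
--         if not matriz[i_0][j_0]: # if matriz[i_0][j_0] == False
--             res += 1
--         return res
--
--     # Divide
--     mitad_filas: int = (i_1 + i_0) // 2
--     mitad_columnas: int = (j_1 + j_0) // 2
--
--     mitades = (
--         (i_0, mitad_filas, j_0, mitad_columnas),
--         (mitad_filas, i_1, j_0, mitad_columnas),
--         (i_0, mitad_filas, mitad_columnas, j_1),
--         (mitad_filas, i_1, mitad_columnas, j_1),
--     )
--
--     # Combine
--     contador: int = 0
--     for mitad in mitades:
--         i, i_, j, j_ = mitad
--         if not conjuncionSubmatriz(i, i_, j, j_, matriz):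
--             contador += cazadorDeFalsosContador(i, i_, j, j_, matriz)
--
--     return contador
-- ===== SOURCE B (Python) =====
-- def cazadorDeFalsosContador(
--     i_0: int, i_1: int, j_0: int, j_1: int, matriz: list[list[bool]]
-- ) -> int:
--     contador = 0
--     for i in range(i_0, i_1):
--         for j in range(j_0, j_1):
--             if not matriz[i][j]:
--                 contador += 1
--     return contador
-- ===== Notes on version B (the rewrite author's own statement) =====
-- stated objective: simpler
-- what changed: Replaced the divide-and-conquer quartering (with its conjuncionSubmatriz pre-scan of every subregion) by a single nested loop that visits each cell of the submatrix once and counts the False entries directly.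
import Mathlib
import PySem

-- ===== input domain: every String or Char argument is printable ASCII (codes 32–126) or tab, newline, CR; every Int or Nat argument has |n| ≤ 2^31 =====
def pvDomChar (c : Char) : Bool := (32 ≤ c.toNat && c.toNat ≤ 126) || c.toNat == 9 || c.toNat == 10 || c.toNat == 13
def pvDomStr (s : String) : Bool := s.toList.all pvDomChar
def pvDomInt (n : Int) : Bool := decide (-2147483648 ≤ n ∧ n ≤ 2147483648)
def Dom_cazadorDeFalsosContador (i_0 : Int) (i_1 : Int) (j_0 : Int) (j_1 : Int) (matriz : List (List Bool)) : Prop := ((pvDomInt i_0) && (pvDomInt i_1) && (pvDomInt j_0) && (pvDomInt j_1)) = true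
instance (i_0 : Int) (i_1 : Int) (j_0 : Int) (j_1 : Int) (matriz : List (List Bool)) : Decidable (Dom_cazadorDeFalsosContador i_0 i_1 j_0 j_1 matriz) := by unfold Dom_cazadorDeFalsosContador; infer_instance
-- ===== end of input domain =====

-- B replaces A's divide-and-conquer quartering by one nested loop counting False cells directly (simpler).

-- ===== PORT A =====
-- matriz[i][j] with Python semantics; `true` default only reached outside Pre_ (Python raises IndexError there)
def pvCell (matriz : List (List Bool)) (i j : Int) : Bool :=
  (PySem.List.pyGet? ((PySem.List.pyGet? matriz i).getD []) j).getD true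

def conjuncionSubmatriz (i_0 i_1 j_0 j_1 : Int) (matriz : List (List Bool)) : Bool :=
  (PySem.List.pyRange i_0 i_1 1).all fun i =>
    (PySem.List.pyRange j_0 j_1 1).all fun j => pvCell matriz i j

def pvCazadorFuel (fuel : Nat) (i_0 i_1 j_0 j_1 : Int) (matriz : List (List Bool)) : Int :=
  match fuel with
  | 0 => 0
  | fuel + 1 =>
    if i_1 - i_0 = 1 ∧ j_1 - j_0 = 1 then
      (if pvCell matriz i_0 j_0 then 0 else 1)
    else
      -- the Python `for mitad in mitades` loop over the four quadrants, unrolled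
      (if conjuncionSubmatriz i_0 (PySem.Int.floordiv (i_1 + i_0) 2) j_0 (PySem.Int.floordiv (j_1 + j_0) 2) matriz = false then
          pvCazadorFuel fuel i_0 (PySem.Int.floordiv (i_1 + i_0) 2) j_0 (PySem.Int.floordiv (j_1 + j_0) 2) matriz else 0)
      + (if conjuncionSubmatriz (PySem.Int.floordiv (i_1 + i_0) 2) i_1 j_0 (PySem.Int.floordiv (j_1 + j_0) 2) matriz = false then
          pvCazadorFuel fuel (PySem.Int.floordiv (i_1 + i_0) 2) i_1 j_0 (PySem.Int.floordiv (j_1 + j_0) 2) matriz else 0)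
      + (if conjuncionSubmatriz i_0 (PySem.Int.floordiv (i_1 + i_0) 2) (PySem.Int.floordiv (j_1 + j_0) 2) j_1 matriz = false then
          pvCazadorFuel fuel i_0 (PySem.Int.floordiv (i_1 + i_0) 2) (PySem.Int.floordiv (j_1 + j_0) 2) j_1 matriz else 0)
      + (if conjuncionSubmatriz (PySem.Int.floordiv (i_1 + i_0) 2) i_1 (PySem.Int.floordiv (j_1 + j_0) 2) j_1 matriz = false then
          pvCazadorFuel fuel (PySem.Int.floordiv (i_1 + i_0) 2) i_1 (PySem.Int.floordiv (j_1 + j_0) 2) j_1 matriz else 0)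

def cazadorDeFalsosContador (i_0 : Int) (i_1 : Int) (j_0 : Int) (j_1 : Int) (matriz : List (List Bool)) : Int :=
  pvCazadorFuel ((i_1 - i_0).toNat + (j_1 - j_0).toNat + 1) i_0 i_1 j_0 j_1 matriz

-- ===== PORT B =====
def cazadorDeFalsosContador_alt (i_0 : Int) (i_1 : Int) (j_0 : Int) (j_1 : Int) (matriz : List (List Bool)) : Int :=
  (PySem.List.pyRange i_0 i_1 1).foldl (fun c i =>
    (PySem.List.pyRange j_0 j_1 1).foldl (fun c j => if pvCell matriz i j then c else c + 1) c) 0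

-- ===== PRECONDITION & SPEC =====
-- Pre_: exactly the inputs where Python A returns (no IndexError): the rectangle is empty,
-- or every row index of it is in range and every column index is in range for each such row.
def Pre_cazadorDeFalsosContador (i_0 : Int) (i_1 : Int) (j_0 : Int) (j_1 : Int) (matriz : List (List Bool)) : Prop :=
  i_1 ≤ i_0 ∨ j_1 ≤ j_0 ∨
    (-(matriz.length : Int) ≤ i_0 ∧ i_1 ≤ (matriz.length : Int) ∧
      ∀ i ∈ PySem.List.pyRange i_0 i_1 1,
        -((((PySem.List.pyGet? matriz i).getD []).length : Int)) ≤ j_0 ∧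
          j_1 ≤ (((PySem.List.pyGet? matriz i).getD []).length : Int))
instance (i_0 : Int) (i_1 : Int) (j_0 : Int) (j_1 : Int) (matriz : List (List Bool)) : Decidable (Pre_cazadorDeFalsosContador i_0 i_1 j_0 j_1 matriz) := by unfold Pre_cazadorDeFalsosContador; infer_instance
def pvWitness_cazadorDeFalsosContador : Int × Int × Int × Int × List (List Bool) := (0, 2, 0, 2, [[true, false], [false, true]])

def Spec_cazadorDeFalsosContador (i_0 : Int) (i_1 : Int) (j_0 : Int) (j_1 : Int) (matriz : List (List Bool)) (out : Int) : Prop := out = cazadorDeFalsosContador_alt i_0 i_1 j_0 j_1 matriz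
instance (i_0 : Int) (i_1 : Int) (j_0 : Int) (j_1 : Int) (matriz : List (List Bool)) (out : Int) : Decidable (Spec_cazadorDeFalsosContador i_0 i_1 j_0 j_1 matriz out) := by unfold Spec_cazadorDeFalsosContador; infer_instance

-- ===== CLAIM (what is proved, stated in full; the proofs are below) =====
def Claim_equal_cazadorDeFalsosContador : Prop := ∀ (i_0 : Int) (i_1 : Int) (j_0 : Int) (j_1 : Int) (matriz : List (List Bool)), Dom_cazadorDeFalsosContador i_0 i_1 j_0 j_1 matriz → Pre_cazadorDeFalsosContador i_0 i_1 j_0 j_1 matriz → Spec_cazadorDeFalsosContador i_0 i_1 j_0 j_1 matriz (cazadorDeFalsosContador i_0 i_1 j_0 j_1 matriz)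

-- ===== LEMMAS AND PROOFS =====

theorem pvConj_false {a b c d : Int} {m : List (List Bool)}
    (h : conjuncionSubmatriz a b c d m = false) : a < b ∧ c < d := by
  constructor
  · by_contra hlt
    push_neg at hlt
    rw [conjuncionSubmatriz, PySem.List.pyRange_one_eq_nil hlt] at h
    simp at h
  · by_contra hlt
    push_neg at hlt
    rw [conjuncionSubmatriz] at h
    simp [PySem.List.pyRange_one_eq_nil hlt] at h

-- the recursion, with a fuel guard for totality: the top-level call passes more fuel than
-- the decreasing measure (i_1-i_0)+(j_1-j_0), so the fuel-0 default 0 is never reached (pvMainFuel)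

theorem pvInner_foldl (m : List (List Bool)) (i : Int) (l : List Int) (c : Int) :
    l.foldl (fun c j => if pvCell m i j then c else c + 1) c
      = c + ((l.countP fun j => !pvCell m i j : Nat) : Int) := by
  induction l generalizing c with
  | nil => simp
  | cons x xs ih =>
    simp only [List.foldl_cons, List.countP_cons, ih]
    by_cases h : pvCell m i x
    · simp [h]
    · simp only [h, Bool.false_eq_true, if_false, Bool.not_false, if_true]
      push_cast
      ring

theorem pvAlt_eq_sum (i_0 i_1 j_0 j_1 : Int) (m : List (List Bool)) :
    cazadorDeFalsosContador_alt i_0 i_1 j_0 j_1 m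
      = ((PySem.List.pyRange i_0 i_1 1).map
          (fun i => (((PySem.List.pyRange j_0 j_1 1).countP fun j => !pvCell m i j : Nat) : Int))).sum := by
  rw [cazadorDeFalsosContador_alt]
  generalize (PySem.List.pyRange i_0 i_1 1) = l
  suffices h : ∀ (l : List Int) (c : Int),
      l.foldl (fun c i => (PySem.List.pyRange j_0 j_1 1).foldl
        (fun c j => if pvCell m i j then c else c + 1) c) c
        = c + (l.map (fun i => (((PySem.List.pyRange j_0 j_1 1).countP fun j => !pvCell m i j : Nat) : Int))).sum by
    simpa using h l 0
  intro l
  induction l with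
  | nil => simp
  | cons x xs ih =>
    intro c
    rw [List.foldl_cons, ih, pvInner_foldl]
    simp only [List.map_cons, List.sum_cons]
    ring

theorem pvAlt_row_split {i_0 i_1 mid : Int} (j_0 j_1 : Int) (m : List (List Bool))
    (h1 : i_0 ≤ mid) (h2 : mid ≤ i_1) :
    cazadorDeFalsosContador_alt i_0 i_1 j_0 j_1 m
      = cazadorDeFalsosContador_alt i_0 mid j_0 j_1 m + cazadorDeFalsosContador_alt mid i_1 j_0 j_1 m := by
  simp [pvAlt_eq_sum, PySem.List.pyRange_one_append i_0 mid i_1 h1 h2]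

theorem pvAlt_col_split (i_0 i_1 : Int) {j_0 j_1 mid : Int} (m : List (List Bool))
    (h1 : j_0 ≤ mid) (h2 : mid ≤ j_1) :
    cazadorDeFalsosContador_alt i_0 i_1 j_0 j_1 m
      = cazadorDeFalsosContador_alt i_0 i_1 j_0 mid m + cazadorDeFalsosContador_alt i_0 i_1 mid j_1 m := by
  simp only [pvAlt_eq_sum, PySem.List.pyRange_one_append j_0 mid j_1 h1 h2, List.countP_append,
    Nat.cast_add]
  rw [← PySem.List.sum_map_add_int]

theorem pvAlt_of_conj_true {i_0 i_1 j_0 j_1 : Int} {m : List (List Bool)}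
    (h : conjuncionSubmatriz i_0 i_1 j_0 j_1 m = true) :
    cazadorDeFalsosContador_alt i_0 i_1 j_0 j_1 m = 0 := by
  rw [conjuncionSubmatriz, List.all_eq_true] at h
  rw [pvAlt_eq_sum]
  apply List.sum_eq_zero
  intro x hx
  simp only [List.mem_map] at hx
  obtain ⟨i, hi, rfl⟩ := hx
  have : ((PySem.List.pyRange j_0 j_1 1).countP fun j => !pvCell m i j) = 0 := by
    rw [List.countP_eq_zero]
    intro j hj
    have := h i hi
    rw [List.all_eq_true] at this
    simp [this j hj]
  simp [this]

theorem pvAlt_empty_rows {i_0 i_1 : Int} (j_0 j_1 : Int) (m : List (List Bool)) (h : i_1 ≤ i_0) :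
    cazadorDeFalsosContador_alt i_0 i_1 j_0 j_1 m = 0 := by
  simp [pvAlt_eq_sum, PySem.List.pyRange_one_eq_nil h]

theorem pvConj_true_of_empty_rows {i_0 i_1 : Int} (j_0 j_1 : Int) (m : List (List Bool)) (h : i_1 ≤ i_0) :
    conjuncionSubmatriz i_0 i_1 j_0 j_1 m = true := by
  simp [conjuncionSubmatriz, PySem.List.pyRange_one_eq_nil h]

theorem pvConj_true_of_empty_cols (i_0 i_1 : Int) {j_0 j_1 : Int} (m : List (List Bool)) (h : j_1 ≤ j_0) :
    conjuncionSubmatriz i_0 i_1 j_0 j_1 m = true := by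
  simp [conjuncionSubmatriz, PySem.List.pyRange_one_eq_nil h]

theorem pvAlt_base {i_0 i_1 j_0 j_1 : Int} (m : List (List Bool))
    (h1 : i_1 - i_0 = 1) (h2 : j_1 - j_0 = 1) :
    cazadorDeFalsosContador_alt i_0 i_1 j_0 j_1 m = (if pvCell m i_0 j_0 then 0 else 1) := by
  have e1 : i_1 = i_0 + 1 := by omega
  have e2 : j_1 = j_0 + 1 := by omega
  subst e1 e2
  simp only [cazadorDeFalsosContador_alt, PySem.List.pyRange_one_singleton, List.foldl_cons,
    List.foldl_nil]
  by_cases h : pvCell m i_0 j_0 <;> simp [h]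

theorem pvMainFuel : ∀ (fuel : Nat) (i_0 i_1 j_0 j_1 : Int) (m : List (List Bool)),
    (i_1 - i_0).toNat + (j_1 - j_0).toNat < fuel →
    pvCazadorFuel fuel i_0 i_1 j_0 j_1 m = cazadorDeFalsosContador_alt i_0 i_1 j_0 j_1 m := by
  intro fuel
  induction fuel with
  | zero => intro i_0 i_1 j_0 j_1 m hn; omega
  | succ fuel ih =>
    intro i_0 i_1 j_0 j_1 m hn
    rw [pvCazadorFuel]
    by_cases hbase : i_1 - i_0 = 1 ∧ j_1 - j_0 = 1
    · rw [if_pos hbase, pvAlt_base m hbase.1 hbase.2]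
    · rw [if_neg hbase]
      have hfd : ∀ a b : Int, PySem.Int.floordiv (a + b) 2 = (a + b) / 2 :=
        fun a b => PySem.Int.floordiv_eq_ediv_of_pos (by norm_num)
      set mf := PySem.Int.floordiv (i_1 + i_0) 2 with hmf
      set mc := PySem.Int.floordiv (j_1 + j_0) 2 with hmc
      have hmf' : mf = (i_1 + i_0) / 2 := by rw [hmf, hfd]
      have hmc' : mc = (j_1 + j_0) / 2 := by rw [hmc, hfd]
      -- each quadrant addend equals the alt-count of that quadrant
      have quad : ∀ (a b c d : Int),
          ((b - a).toNat + (d - c).toNat < fuel ∨ conjuncionSubmatriz a b c d m = true) →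
          (if conjuncionSubmatriz a b c d m = false then pvCazadorFuel fuel a b c d m else 0)
            = cazadorDeFalsosContador_alt a b c d m := by
        intro a b c d hcase
        by_cases hc : conjuncionSubmatriz a b c d m = false
        · rw [if_pos hc]
          rcases hcase with hlt | htrue
          · exact ih a b c d m hlt
          · rw [htrue] at hc; simp at hc
        · rw [if_neg hc]
          have : conjuncionSubmatriz a b c d m = true := by
            cases hcc : conjuncionSubmatriz a b c d m
            · exact absurd hcc hc
            · rfl
          exact (pvAlt_of_conj_true this).symm
      by_cases hrow : i_0 < i_1
      · by_cases hcol : j_0 < j_1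
        · -- nonempty rectangle: split alt at the midpoints
          have hb1 : i_0 ≤ mf := by rw [hmf']; omega
          have hb2 : mf ≤ i_1 := by rw [hmf']; omega
          have hb3 : j_0 ≤ mc := by rw [hmc']; omega
          have hb4 : mc ≤ j_1 := by rw [hmc']; omega
          rw [pvAlt_row_split j_0 j_1 m hb1 hb2, pvAlt_col_split i_0 mf m hb3 hb4,
            pvAlt_col_split mf i_1 m hb3 hb4]
          -- each quadrant is strictly smaller, or its conjunction is true (empty quadrant)
          rw [quad i_0 mf j_0 mc ?_, quad mf i_1 j_0 mc ?_, quad i_0 mf mc j_1 ?_,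
            quad mf i_1 mc j_1 ?_]
          · ring
          · by_cases hc : conjuncionSubmatriz mf i_1 mc j_1 m = false
            · left
              obtain ⟨ha, hb⟩ := pvConj_false hc
              rw [hmf'] at ha; rw [hmc'] at hb
              rw [hmf', hmc']; omega
            · right
              cases hcc : conjuncionSubmatriz mf i_1 mc j_1 m
              · exact absurd hcc hc
              · rfl
          · by_cases hc : conjuncionSubmatriz i_0 mf mc j_1 m = false
            · left
              obtain ⟨ha, hb⟩ := pvConj_false hc
              rw [hmf'] at ha; rw [hmc'] at hb
              rw [hmf', hmc']; omega
            · right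
              cases hcc : conjuncionSubmatriz i_0 mf mc j_1 m
              · exact absurd hcc hc
              · rfl
          · by_cases hc : conjuncionSubmatriz mf i_1 j_0 mc m = false
            · left
              obtain ⟨ha, hb⟩ := pvConj_false hc
              rw [hmf'] at ha; rw [hmc'] at hb
              rw [hmf', hmc']; omega
            · right
              cases hcc : conjuncionSubmatriz mf i_1 j_0 mc m
              · exact absurd hcc hc
              · rfl
          · by_cases hc : conjuncionSubmatriz i_0 mf j_0 mc m = false
            · left
              obtain ⟨ha, hb⟩ := pvConj_false hc
              rw [hmf'] at ha; rw [hmc'] at hb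
              rw [hmf', hmc']; omega
            · right
              cases hcc : conjuncionSubmatriz i_0 mf j_0 mc m
              · exact absurd hcc hc
              · rfl
        · -- empty columns: every quadrant's conjunction is vacuously true, both sides 0
          push_neg at hcol
          have c1 := pvConj_true_of_empty_cols i_0 mf m (show mc ≤ j_0 by rw [hmc']; omega)
          have c2 := pvConj_true_of_empty_cols mf i_1 m (show mc ≤ j_0 by rw [hmc']; omega)
          have c3 := pvConj_true_of_empty_cols i_0 mf m (show j_1 ≤ mc by rw [hmc']; omega)
          have c4 := pvConj_true_of_empty_cols mf i_1 m (show j_1 ≤ mc by rw [hmc']; omega)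
          rw [if_neg (by simp [c1]), if_neg (by simp [c2]), if_neg (by simp [c3]),
            if_neg (by simp [c4])]
          rw [pvAlt_eq_sum]
          simp [PySem.List.pyRange_one_eq_nil hcol]
      · -- empty rows: every quadrant's row range is empty, both sides 0
        push_neg at hrow
        have c1 := pvConj_true_of_empty_rows j_0 mc m (show mf ≤ i_0 by rw [hmf']; omega)
        have c2 := pvConj_true_of_empty_rows j_0 mc m (show i_1 ≤ mf by rw [hmf']; omega)
        have c3 := pvConj_true_of_empty_rows mc j_1 m (show mf ≤ i_0 by rw [hmf']; omega)
        have c4 := pvConj_true_of_empty_rows mc j_1 m (show i_1 ≤ mf by rw [hmf']; omega)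
        rw [if_neg (by simp [c1]), if_neg (by simp [c2]), if_neg (by simp [c3]),
          if_neg (by simp [c4])]
        rw [pvAlt_empty_rows j_0 j_1 m hrow]
        norm_num

-- ===== VERDICT (by name: the statement is the Claim_ definition above) =====
theorem cazadorDeFalsosContador_spec : Claim_equal_cazadorDeFalsosContador := by
  intro i_0 i_1 j_0 j_1 matriz _ _
  exact pvMainFuel _ i_0 i_1 j_0 j_1 matriz (Nat.lt_succ_self _)
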